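-- pv_equiv track=rewrite | github.com/VesterlundCoder/cmfatlas | src/cmf_atlas/canonical/hypergeom.py | _make_primitive
-- ===== SOURCE A (Python) =====
-- from math import gcd
-- from functools import reduce
--
-- def _make_primitive(coeffs: list[int]) -> list[int]:
--     """Divide by GCD, ensure leading coeff positive."""
--     nonzero = [abs(c) for c in coeffs if c != 0]
--     if not nonzero:
--         return [0]
--     g = reduce(gcd, nonzero)
--     result = [c // g for c in coeffs]
--     # Fix sign: leading nonzero coeff positive
--     for c in reversed(result):
--         if c != 0:
--             if c < 0:
--                 result = [-x for x in result]
--             break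
--     return result
-- ===== SOURCE B (Python) =====
-- def _content(vals: list[int]) -> int:
--     """Gcd of all entries by generalized Euclid: reduce everything modulo the
--     smallest nonzero magnitude until only multiples of it remain."""
--     p = min((abs(v) for v in vals if v != 0), default=0)
--     if p == 0:
--         return 0
--     rem = [v % p for v in vals]
--     if any(r != 0 for r in rem):
--         return _content([p] + rem)
--     return p
--
--
-- def _signed_divisor(coeffs: list[int], g: int) -> int:
--     """g with the sign of the last nonzero coefficient (g if none)."""
--     for c in reversed(coeffs):
--         if c != 0:
--             return g if c > 0 else -g
--     return g
--
--
-- def _make_primitive(coeffs: list[int]) -> list[int]: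
--     """Divide by GCD, ensure leading coeff positive."""
--     g = _content(coeffs)
--     if g == 0:
--         return [0]
--     d = _signed_divisor(coeffs, g)
--     return [c // d for c in coeffs]
-- ===== Notes on version B (the rewrite author's own statement) =====
-- stated objective: alternative
-- what changed: B computes the content by a generalized Euclid on the whole list (recursively reduce every entry modulo the smallest nonzero magnitude until only multiples of it remain) instead of A's reduce(math.gcd) over filtered absolute values, and performs a single division by the signed divisor instead of A's divide-then-reversed-scan-then-renegate passes.
import Mathlib
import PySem

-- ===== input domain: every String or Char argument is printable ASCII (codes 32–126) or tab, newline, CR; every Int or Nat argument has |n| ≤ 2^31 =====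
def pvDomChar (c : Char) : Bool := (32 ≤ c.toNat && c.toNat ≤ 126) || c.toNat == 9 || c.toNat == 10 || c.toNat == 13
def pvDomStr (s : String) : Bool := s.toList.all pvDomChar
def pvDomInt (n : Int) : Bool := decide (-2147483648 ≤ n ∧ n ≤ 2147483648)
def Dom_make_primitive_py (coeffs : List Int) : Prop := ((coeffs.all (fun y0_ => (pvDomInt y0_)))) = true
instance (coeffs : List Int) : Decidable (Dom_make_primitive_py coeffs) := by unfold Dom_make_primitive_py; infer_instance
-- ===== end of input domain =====

-- B computes the gcd by a generalized Euclid on the whole list (reduce modulo the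
-- smallest nonzero magnitude until only its multiples remain) and divides once by
-- the signed divisor, instead of A's reduce(gcd)+divide+reversed-scan+renegate
-- pipeline (objective: alternative).

-- math.gcd on Python ints (always nonnegative)
def pyGcd (a b : Int) : Int := (Int.gcd a b : Int)

-- ===== PORT A =====
-- the 'for c in reversed(result): if c != 0: …; break' loop of A
def pyFixSign : List Int → List Int → List Int
  | [], res => res
  | c :: rest, res =>
      if c ≠ 0 then (if c < 0 then res.map (fun x => -x) else res) else pyFixSign rest res

def make_primitive_py (coeffs : List Int) : List Int :=
  let nonzero := (coeffs.filter (fun c => c != 0)).map (fun c => |c|)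
  match nonzero with
  | [] => [0]
  | a :: rest =>
    let g := rest.foldl pyGcd a
    let result := coeffs.map (fun c => PySem.Int.floordiv c g)
    pyFixSign result.reverse result

-- ===== PORT B =====
-- 'min((abs(v) for v in vals if v != 0), default=0)' of Source B's _content
def pvPivot (vals : List Int) : Int :=
  (PySem.List.min? ((vals.filter (fun v => v != 0)).map (fun v => |v|)) (fun x => x)).getD 0

-- facts the recursion of pvContent needs for termination (cited in decreasing_by)
theorem pvPivot_le (vals : List Int) (v : Int) (hv : v ∈ vals) (h0 : v ≠ 0) :
    pvPivot vals ≤ |v| := by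
  have hmem : |v| ∈ (vals.filter (fun v => v != 0)).map (fun v => |v|) :=
    List.mem_map_of_mem (List.mem_filter.mpr ⟨hv, by simpa using h0⟩)
  unfold pvPivot
  cases hmin : PySem.List.min? ((vals.filter (fun v => v != 0)).map (fun v => |v|)) (fun x => x) with
  | none =>
      rw [PySem.List.min?_eq_none_iff] at hmin
      rw [hmin] at hmem; cases hmem
  | some m =>
      simpa using PySem.List.min?_isMin hmin _ hmem

theorem pvPivot_pos (vals : List Int) (h : pvPivot vals ≠ 0) : 0 < pvPivot vals := by
  unfold pvPivot at *
  cases hmin : PySem.List.min? ((vals.filter (fun v => v != 0)).map (fun v => |v|)) (fun x => x) with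
  | none => rw [hmin] at h; simp at h
  | some m =>
      have hm := PySem.List.min?_mem hmin
      obtain ⟨w, hw, rfl⟩ := List.mem_map.mp hm
      have : w ≠ 0 := by simpa using (List.mem_filter.mp hw).2
      simpa using abs_pos.mpr this

theorem pvPivot_decrease (vals : List Int) (hp : ¬ pvPivot vals = 0)
    (hr : ((vals.map (fun v => PySem.Int.mod v (pvPivot vals))).any fun r => r != 0) = true) :
    (pvPivot (pvPivot vals :: vals.map (fun v => PySem.Int.mod v (pvPivot vals)))).toNat
      < (pvPivot vals).toNat := by
  set p := pvPivot vals with hpd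
  have hppos : 0 < p := pvPivot_pos vals hp
  obtain ⟨r, hrmem, hrne⟩ := List.any_eq_true.mp hr
  have hrne' : r ≠ 0 := by simpa using hrne
  obtain ⟨v, _, rfl⟩ := List.mem_map.mp hrmem
  have h0 : 0 ≤ PySem.Int.mod v p := PySem.Int.mod_nonneg _ hppos
  have hlt : PySem.Int.mod v p < p := PySem.Int.mod_lt _ hppos
  have hle : pvPivot (p :: vals.map (fun v => PySem.Int.mod v p)) ≤ |PySem.Int.mod v p| :=
    pvPivot_le _ _ (List.mem_cons_of_mem _ hrmem) hrne'
  rw [abs_of_nonneg h0] at hle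
  omega

-- 'rem = [v % p for v in vals]' of Source B's _content
def pvRems (vals : List Int) (p : Int) : List Int := vals.map (fun v => PySem.Int.mod v p)

def pvContent (vals : List Int) : Int :=
  if pvPivot vals = 0 then 0
  else if (pvRems vals (pvPivot vals)).any (fun r => r != 0) then
    pvContent (pvPivot vals :: pvRems vals (pvPivot vals))
  else pvPivot vals
termination_by (pvPivot vals).toNat
decreasing_by
  rename_i hp hr
  exact pvPivot_decrease vals hp (by simpa [pvRems] using hr)

-- the 'for c in reversed(coeffs): if c != 0: return … ' loop of Source B's _signed_divisor
def pvSignedDivisor : List Int → Int → Int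
  | [], g => g
  | c :: rest, g => if c ≠ 0 then (if 0 < c then g else -g) else pvSignedDivisor rest g

def make_primitive_py_alt (coeffs : List Int) : List Int :=
  let g := pvContent coeffs
  if g = 0 then [0]
  else
    let d := pvSignedDivisor coeffs.reverse g
    coeffs.map (fun c => PySem.Int.floordiv c d)

-- ===== PRECONDITION & SPEC =====
def Spec_make_primitive_py (coeffs : List Int) (out : List Int) : Prop := out = make_primitive_py_alt coeffs
instance (coeffs : List Int) (out : List Int) : Decidable (Spec_make_primitive_py coeffs out) := by unfold Spec_make_primitive_py; infer_instance

-- ===== CLAIM (what is proved, stated in full; the proofs are below) =====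
def Claim_equal_make_primitive_py : Prop := ∀ (coeffs : List Int), Dom_make_primitive_py coeffs → Spec_make_primitive_py coeffs (make_primitive_py coeffs)

-- ===== LEMMAS AND PROOFS =====

-- gcd of the absolute values of a list
def gcdL : List Int → Nat
  | [] => 0
  | c :: t => Nat.gcd c.natAbs (gcdL t)

theorem gcdL_dvd_mem (l : List Int) (c : Int) (hc : c ∈ l) : gcdL l ∣ c.natAbs := by
  induction l with
  | nil => cases hc
  | cons d t ih =>
      rcases List.mem_cons.mp hc with h | h
      · subst h; exact Nat.gcd_dvd_left _ _
      · exact (Nat.gcd_dvd_right _ _).trans (ih h)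

theorem dvd_gcdL (l : List Int) (d : Nat) (h : ∀ c ∈ l, d ∣ c.natAbs) : d ∣ gcdL l := by
  induction l with
  | nil => exact Dvd.intro 0 rfl
  | cons c t ih =>
      exact Nat.dvd_gcd (h c List.mem_cons_self) (ih fun c hc => h c (List.mem_cons_of_mem _ hc))

theorem gcdL_eq_zero (l : List Int) (h : ∀ v ∈ l, v = 0) : gcdL l = 0 := by
  induction l with
  | nil => rfl
  | cons c t ih =>
      rw [gcdL, h c List.mem_cons_self, ih fun v hv => h v (List.mem_cons_of_mem _ hv)]
      rfl

-- modding by p does not change the gcd with p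
theorem gcd_mod_elem (p v : Int) (hp : 0 < p) :
    Nat.gcd p.toNat (PySem.Int.mod v p).natAbs = Nat.gcd p.toNat v.natAbs := by
  have hm : PySem.Int.mod v p = v % p := PySem.Int.mod_eq_emod_of_pos hp
  have h1 : Int.gcd p (v % p) = Int.gcd p v := by
    conv_rhs => rw [show v = v % p + p * (v / p) by rw [Int.emod_def]; ring]
    rw [Int.gcd_add_mul_left_right]
  have hpn : p.natAbs = p.toNat := by omega
  calc Nat.gcd p.toNat (PySem.Int.mod v p).natAbs
      = Int.gcd p (v % p) := by rw [hm, Int.gcd, hpn]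
    _ = Int.gcd p v := h1
    _ = Nat.gcd p.toNat v.natAbs := by rw [Int.gcd, hpn]

theorem gcd_gcdL_mod (p : Int) (hp : 0 < p) (l : List Int) :
    Nat.gcd p.toNat (gcdL (l.map (fun v => PySem.Int.mod v p))) = Nat.gcd p.toNat (gcdL l) := by
  induction l with
  | nil => rfl
  | cons v t ih =>
      simp only [List.map_cons, gcdL]
      rw [← Nat.gcd_assoc, gcd_mod_elem p v hp, Nat.gcd_comm p.toNat v.natAbs,
        Nat.gcd_assoc, ih, ← Nat.gcd_assoc, Nat.gcd_comm v.natAbs p.toNat, Nat.gcd_assoc]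

theorem pvPivot_pos_of_mem (l : List Int) (v : Int) (hv : v ∈ l) (h0 : v ≠ 0) :
    0 < pvPivot l := by
  unfold pvPivot
  cases hmin : PySem.List.min? ((l.filter (fun v => v != 0)).map (fun v => |v|)) (fun x => x) with
  | none =>
      rw [PySem.List.min?_eq_none_iff] at hmin
      have hmem : |v| ∈ (l.filter (fun v => v != 0)).map (fun v => |v|) :=
        List.mem_map_of_mem (List.mem_filter.mpr ⟨hv, by simpa using h0⟩)
      rw [hmin] at hmem; cases hmem
  | some m =>
      have hm := PySem.List.min?_mem hmin
      obtain ⟨w, hw, rfl⟩ := List.mem_map.mp hm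
      have : w ≠ 0 := by simpa using (List.mem_filter.mp hw).2
      simpa using abs_pos.mpr this

theorem pvPivot_eq_zero (l : List Int) (h : pvPivot l = 0) : ∀ v ∈ l, v = 0 := by
  intro v hv
  by_contra h0
  have := pvPivot_pos_of_mem l v hv h0
  omega

theorem pvPivot_mem (l : List Int) (h : pvPivot l ≠ 0) : ∃ v ∈ l, |v| = pvPivot l := by
  unfold pvPivot at *
  cases hmin : PySem.List.min? ((l.filter (fun v => v != 0)).map (fun v => |v|)) (fun x => x) with
  | none => rw [hmin] at h; simp at h
  | some m =>
      have hm := PySem.List.min?_mem hmin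
      obtain ⟨w, hw, rfl⟩ := List.mem_map.mp hm
      exact ⟨w, (List.mem_filter.mp hw).1, rfl⟩

theorem pvContent_eq_gcdL (vals : List Int) : pvContent vals = (gcdL vals : Int) := by
  fun_induction pvContent vals with
  | case1 vals hp =>
      rw [gcdL_eq_zero vals (pvPivot_eq_zero vals hp)]
      rfl
  | case2 vals hp hr ih =>
      rw [ih]
      have hppos : 0 < pvPivot vals := pvPivot_pos vals hp
      have hstep : gcdL (pvPivot vals :: pvRems vals (pvPivot vals))
          = Nat.gcd (pvPivot vals).toNat (gcdL vals) := by
        rw [gcdL, pvRems, show (pvPivot vals).natAbs = (pvPivot vals).toNat by omega,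
          gcd_gcdL_mod _ hppos]
      rw [hstep]
      obtain ⟨w, hw, hweq⟩ := pvPivot_mem vals hp
      have hwn : w.natAbs = (pvPivot vals).toNat := by
        have : (w.natAbs : Int) = pvPivot vals := by rw [← Int.abs_eq_natAbs]; exact hweq
        omega
      have hdvd : gcdL vals ∣ (pvPivot vals).toNat := by
        have := gcdL_dvd_mem vals w hw
        rwa [hwn] at this
      rw [Nat.gcd_eq_right hdvd]
  | case3 vals hp hr =>
      have hppos : 0 < pvPivot vals := pvPivot_pos vals hp
      have hall : ∀ v ∈ vals, pvPivot vals ∣ v := by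
        intro v hv
        have : PySem.Int.mod v (pvPivot vals) = 0 := by
          by_contra hne
          exact hr (List.any_eq_true.mpr
            ⟨_, by rw [pvRems]; exact List.mem_map_of_mem hv, by simpa using hne⟩)
        exact (PySem.Int.mod_eq_zero_iff_dvd _ _).mp this
      obtain ⟨w, hw, hweq⟩ := pvPivot_mem vals hp
      have hwn : w.natAbs = (pvPivot vals).toNat := by
        have : (w.natAbs : Int) = pvPivot vals := by rw [← Int.abs_eq_natAbs]; exact hweq
        omega
      have h1 : gcdL vals ∣ (pvPivot vals).toNat := by
        have := gcdL_dvd_mem vals w hw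
        rwa [hwn] at this
      have h2 : (pvPivot vals).toNat ∣ gcdL vals := by
        apply dvd_gcdL
        intro c hc
        have hdc := hall c hc
        have hdc2 : ((pvPivot vals).toNat : Int) ∣ c := by
          rwa [show ((pvPivot vals).toNat : Int) = pvPivot vals by omega]
        have h3 := Int.natAbs_dvd_natAbs.mpr hdc2
        rwa [Int.natAbs_natCast] at h3
      have := Nat.dvd_antisymm h1 h2
      omega

-- the foldl gcd of A equals gcdL
def gcdF (a : Nat) (l : List Int) : Nat := l.foldl (fun n c => Nat.gcd n c.natAbs) a

theorem foldl_pyGcd_natCast (l : List Int) (a : Nat) :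
    l.foldl pyGcd (a : Int) = (gcdF a l : Int) := by
  induction l generalizing a with
  | nil => rfl
  | cons c t ih =>
      have h : pyGcd (a : Int) c = ((Nat.gcd a c.natAbs : Nat) : Int) := by
        simp [pyGcd, Int.gcd]
      simp only [List.foldl_cons, h, gcdF] at *
      exact ih _

theorem gcdF_eq_gcd_gcdL (l : List Int) (a : Nat) : gcdF a l = Nat.gcd a (gcdL l) := by
  induction l generalizing a with
  | nil => simp [gcdF, gcdL]
  | cons c t ih =>
      simp only [gcdF, List.foldl_cons, gcdL] at *
      rw [ih, Nat.gcd_assoc]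

theorem gcdL_filter (l : List Int) : gcdL (l.filter (fun c => c != 0)) = gcdL l := by
  induction l with
  | nil => rfl
  | cons c t ih =>
      by_cases hc : c = 0
      · subst hc
        simp only [List.filter_cons, gcdL]
        rw [show ((0 : Int) != 0) = false by rfl]
        simp [ih]
      · simp only [List.filter_cons, show (c != 0) = true by simpa using hc, if_pos, gcdL, ih]

-- exact floor division
theorem floordiv_of_dvd (c d : Int) (hd : d ≠ 0) (h : d ∣ c) :
    PySem.Int.floordiv c d = c / d := by
  have hm : PySem.Int.mod c d = 0 := (PySem.Int.mod_eq_zero_iff_dvd c d).mpr h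
  have := PySem.Int.floordiv_mul_add_mod c d
  rw [hm, add_zero] at this
  have h2 : c / d = PySem.Int.floordiv c d * d / d := by rw [this]
  rw [Int.mul_ediv_cancel _ hd] at h2
  exact h2.symm

-- characterization of A's sign-fixing loop
theorem pyFixSign_eq_find (L res : List Int) :
    pyFixSign L res
      = (match L.find? (fun c => c != 0) with
         | none => res
         | some c => if c < 0 then res.map (fun x => -x) else res) := by
  induction L with
  | nil => rfl
  | cons c t ih =>
      by_cases hc : c = 0
      · subst hc; simpa [pyFixSign, List.find?] using ih
      · simp [pyFixSign, hc, List.find?, show (c != 0) = true by simpa using hc]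

-- characterization of B's signed-divisor loop
theorem pvSignedDivisor_eq_find (L : List Int) (g : Int) :
    pvSignedDivisor L g
      = (match L.find? (fun c => c != 0) with
         | none => g
         | some c => if 0 < c then g else -g) := by
  induction L with
  | nil => rfl
  | cons c t ih =>
      by_cases hc : c = 0
      · subst hc; simpa [pvSignedDivisor, List.find?] using ih
      · simp [pvSignedDivisor, hc, List.find?, show (c != 0) = true by simpa using hc]

-- find? over reverse is getLast? of the filter
theorem find?_reverse_eq_getLast?_filter (l : List Int) (p : Int → Bool) :
    l.reverse.find? p = (l.filter p).getLast? := by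
  induction l with
  | nil => rfl
  | cons c t ih =>
      rw [List.reverse_cons, List.find?_append, ih, List.filter_cons]
      by_cases hc : p c
      · simp only [hc, if_pos]
        cases hfl : (t.filter p) with
        | nil => simp [List.find?, hc]
        | cons d fl =>
            cases h2 : (d :: fl).getLast? with
            | none => exact absurd h2 (by simp)
            | some e => exact h2.symm
      · simp [hc, List.find?]

-- exact-division facts for a positive gcd G dividing c
theorem fdiv_G (G : Nat) (hG : 0 < G) (c : Int) (h : (G : Int) ∣ c) :
    PySem.Int.floordiv c (G : Int) = c / (G : Int) :=
  floordiv_of_dvd c _ (by exact_mod_cast hG.ne') h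

theorem fdiv_neg_G (G : Nat) (hG : 0 < G) (c : Int) (h : (G : Int) ∣ c) :
    PySem.Int.floordiv c (-(G : Int)) = -(PySem.Int.floordiv c (G : Int)) := by
  have hne : (G : Int) ≠ 0 := by exact_mod_cast hG.ne'
  rw [floordiv_of_dvd c _ (neg_ne_zero.mpr hne) ((neg_dvd).mpr h),
      floordiv_of_dvd c _ hne h, Int.ediv_neg]

theorem fdiv_neg_iff (G : Nat) (hG : 0 < G) (c : Int) (h : (G : Int) ∣ c) :
    PySem.Int.floordiv c (G : Int) < 0 ↔ c < 0 := by
  have hne : (G : Int) ≠ 0 := by exact_mod_cast hG.ne'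
  have hGpos : (0 : Int) < (G : Int) := by exact_mod_cast hG
  rw [fdiv_G G hG c h]
  obtain ⟨k, rfl⟩ := h
  rw [Int.mul_ediv_cancel_left _ hne]
  constructor
  · intro hk; exact mul_neg_of_pos_of_neg hGpos hk
  · intro hk
    rcases lt_or_ge k 0 with hk0 | hk0
    · exact hk0
    · exact absurd (mul_nonneg hGpos.le hk0) (not_le.mpr hk)

theorem make_primitive_py_eq_alt (coeffs : List Int) :
    make_primitive_py coeffs = make_primitive_py_alt coeffs := by
  simp only [make_primitive_py, make_primitive_py_alt, pvContent_eq_gcdL]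
  cases hfl : coeffs.filter (fun c => c != 0) with
  | nil =>
      have hg0 : gcdL coeffs = 0 := by rw [← gcdL_filter, hfl]; rfl
      simp [hg0]
  | cons h t =>
      have hh : h ∈ coeffs.filter (fun c => c != 0) := by rw [hfl]; exact List.mem_cons_self
      have hh0 : h ≠ 0 := by simpa using (List.mem_filter.mp hh).2
      set G : Nat := gcdL coeffs with hGdef
      have hG : 0 < G := by
        rcases Nat.eq_zero_or_pos G with h0 | h0
        · exfalso
          have := gcdL_dvd_mem coeffs h (List.mem_filter.mp hh).1
          rw [← hGdef, h0] at this
          exact hh0 (by omega)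
        · exact h0
      have hGne : ((G : Int)) ≠ 0 := by exact_mod_cast hG.ne'
      -- A's reduce(gcd, nonzero) computes G
      have hmapfold : ∀ (u : List Int) (x : Int),
          ((u.map (fun c => |c|)).foldl pyGcd x) = u.foldl pyGcd x := by
        intro u
        induction u with
        | nil => intro x; rfl
        | cons d u ih =>
            intro x
            simp only [List.map_cons, List.foldl_cons, ih]
            congr 1
            simp [pyGcd, Int.gcd, Int.natAbs_abs]
      have hAg : ((t.map (fun c => |c|)).foldl pyGcd |h|) = (G : Int) := by
        rw [hmapfold, Int.abs_eq_natAbs, foldl_pyGcd_natCast]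
        congr 1
        have : gcdF h.natAbs t = gcdL (h :: t) := by
          rw [gcdF_eq_gcd_gcdL, gcdL]
        rw [this, ← hfl, gcdL_filter]
      -- G divides every coefficient
      have hdvd : ∀ c ∈ coeffs, (G : Int) ∣ c := by
        intro c hc
        have := gcdL_dvd_mem coeffs c hc
        exact Int.natCast_dvd.mpr this
      simp only [List.map_cons, hAg, if_neg hGne]
      -- both sign scans find the last nonzero coefficient
      rw [pyFixSign_eq_find, find?_reverse_eq_getLast?_filter, List.filter_map,
        pvSignedDivisor_eq_find, find?_reverse_eq_getLast?_filter]
      have hfc : coeffs.filter ((fun c => c != 0) ∘ (fun c => PySem.Int.floordiv c (G : Int)))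
          = coeffs.filter (fun c => c != 0) := by
        apply List.filter_congr
        intro c hc
        have hd := hdvd c hc
        have heq := fdiv_G G hG c hd
        simp only [Function.comp]
        obtain ⟨k, rfl⟩ := hd
        rw [heq, Int.mul_ediv_cancel_left _ hGne]
        have : k = 0 ↔ (G:Int) * k = 0 := by
          constructor
          · intro hk; rw [hk, mul_zero]
          · intro hk; rcases mul_eq_zero.mp hk with h' | h'
            · exact absurd h' hGne
            · exact h'
        by_cases hk : k = 0
        · simp [hk]
        · have h2 : (G:Int) * k ≠ 0 := fun h' => hk (this.mpr h')
          rw [show (k != 0) = true by simpa using hk,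
            show ((G:Int) * k != 0) = true by simpa using h2]
      rw [hfc, hfl]
      -- the last nonzero coefficient e
      cases hlast : (h :: t).getLast? with
      | none => exact absurd hlast (by simp)
      | some e =>
          have he_mem : e ∈ coeffs.filter (fun c => c != 0) := by
            rw [hfl]; exact List.mem_of_getLast? hlast
          have he0 : e ≠ 0 := by simpa using (List.mem_filter.mp he_mem).2
          have he_dvd : (G : Int) ∣ e := hdvd e (List.mem_filter.mp he_mem).1
          simp only [List.getLast?_map, hlast, Option.map_some]
          by_cases hpos : 0 < e
          · have hnn : ¬ PySem.Int.floordiv e (G : Int) < 0 := by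
              rw [fdiv_neg_iff G hG e he_dvd]; omega
            simp [hnn, hpos]
          · have helt : e < 0 := by omega
            have hlt : PySem.Int.floordiv e (G : Int) < 0 :=
              (fdiv_neg_iff G hG e he_dvd).mpr helt
            simp only [if_pos hlt, if_neg hpos, List.map_map]
            apply List.map_congr_left
            intro c hc
            simp only [Function.comp]
            rw [fdiv_neg_G G hG c (hdvd c hc)]

-- ===== VERDICT (by name: the statement is the Claim_ definition above) =====
theorem make_primitive_py_spec : Claim_equal_make_primitive_py := by
  intro coeffs _
  unfold Spec_make_primitive_py
  exact make_primitive_py_eq_alt coeffs
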